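-- pv_equiv track=rewrite | github.com/kobedawes/SSW215 | Hw9/even_ind.py | helperFunc
-- ===== SOURCE A (Python) =====
-- def helperFunc(string, count, word):
--     if string == '':
--         return word
--     elif count % 2 == 0:
--         return helperFunc(string[1:], count + 1, word)
--     else:
--         word += string[0]
--         return helperFunc(string[1:], count + 1, word)
-- ===== SOURCE B (Python) =====
-- def helperFunc(string, count, word):
--     # Iterative loop instead of tail recursion: append each char whose running
--     # count is odd, incrementing count once per character.
--     for ch in string:
--         if count % 2 == 1:
--             word += ch
--         count += 1
--     return word
-- ===== Notes on version B (the rewrite author's own statement) =====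
-- stated objective: faster
-- what changed: Replaced the tail recursion that rebuilds the string with string[1:] at each step by a single iterative for-loop over the characters with a running count accumulator.
import Mathlib
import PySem

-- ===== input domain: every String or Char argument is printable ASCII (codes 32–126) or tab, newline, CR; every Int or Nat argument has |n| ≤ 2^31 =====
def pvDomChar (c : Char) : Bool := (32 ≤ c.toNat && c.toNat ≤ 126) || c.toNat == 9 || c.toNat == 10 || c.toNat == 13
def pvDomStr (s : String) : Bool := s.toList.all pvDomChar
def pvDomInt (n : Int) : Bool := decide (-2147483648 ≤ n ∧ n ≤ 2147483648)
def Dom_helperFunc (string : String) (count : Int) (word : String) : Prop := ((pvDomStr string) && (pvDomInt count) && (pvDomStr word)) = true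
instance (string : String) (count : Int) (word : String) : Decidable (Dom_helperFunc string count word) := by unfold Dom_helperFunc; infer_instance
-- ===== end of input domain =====

-- B replaces A's tail recursion (which re-slices the string each call) with one
-- iterative loop keeping a running count; objective: simpler.


-- ===== PORT A =====
-- A's recursion on the string: '' test, string[0], string[1:] become the List Char
-- pattern match; branches kept in A's order.  count % 2 uses Int.emod, which for
-- the positive divisor 2 agrees with Python's %.
def helperFuncAux : List Char → Int → List Char → List Char
  | [], _, word => word
  | c :: rest, count, word =>
    if count % 2 == 0 then helperFuncAux rest (count + 1) word
    else helperFuncAux rest (count + 1) (word ++ [c])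

def helperFunc (string : String) (count : Int) (word : String) : String :=
  String.mk (helperFuncAux string.toList count word.toList)

-- ===== PORT B =====
-- B's for-loop over the characters, threading (count, word) as the fold state.
def helperFunc_alt (string : String) (count : Int) (word : String) : String :=
  String.mk
    ((string.toList.foldl
        (fun (st : Int × List Char) ch =>
          (st.1 + 1, if st.1 % 2 == 1 then st.2 ++ [ch] else st.2))
        (count, word.toList)).2)

-- ===== PRECONDITION & SPEC =====
def Spec_helperFunc (string : String) (count : Int) (word : String) (out : String) : Prop := out = helperFunc_alt string count word
instance (string : String) (count : Int) (word : String) (out : String) : Decidable (Spec_helperFunc string count word out) := by unfold Spec_helperFunc; infer_instance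

-- ===== CLAIM (what is proved, stated in full; the proofs are below) =====
def Claim_equal_helperFunc : Prop := ∀ (string : String) (count : Int) (word : String), Dom_helperFunc string count word → Spec_helperFunc string count word (helperFunc string count word)

-- ===== LEMMAS AND PROOFS =====
theorem helperFuncAux_eq_foldl (l : List Char) :
    ∀ (count : Int) (word : List Char),
      helperFuncAux l count word =
        (l.foldl
          (fun (st : Int × List Char) ch =>
            (st.1 + 1, if st.1 % 2 == 1 then st.2 ++ [ch] else st.2))
          (count, word)).2 := by
  induction l with
  | nil => intro count word; rfl
  | cons c rest ih =>
    intro count word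
    simp only [helperFuncAux, List.foldl]
    rcases Int.emod_two_eq count with h | h
    · rw [if_pos (by simp [h]), if_neg (by simp [h]), ih]
    · rw [if_neg (by simp [h]), if_pos (by simp [h]), ih]

-- ===== VERDICT (by name: the statement is the Claim_ definition above) =====
theorem helperFunc_spec : Claim_equal_helperFunc := by
  intro string count word _
  unfold Spec_helperFunc helperFunc helperFunc_alt
  rw [helperFuncAux_eq_foldl]
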